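-- pv_equiv track=rewrite | github.com/chaubeyniha/SATSolver | SATSolver/SAT.py | get_elements_dict
-- ===== SOURCE A (Python) =====
-- def remove_negation(element): #remove the negation if element has one. so '-1' becomes '1'.
--     if element[0] == '-': return element[1:]
--     else: return element
--
-- def get_elements_dict(lines): # returns a dictionary with every element that is used as keys, and None as value
--     all_elements = []
--     for clause in lines:
--         for element in clause:
--             element = remove_negation(element)
--             if element not in all_elements:
--                 all_elements.append(element)
--     all_elements.sort()
--
--     nones = [None for i in range(len(all_elements))]
--
--
--     dictionary = dict(zip(all_elements, nones))
--     return dictionary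
-- ===== SOURCE B (Python) =====
-- def get_elements_dict(lines):
--     # sort-then-adjacent-dedup: flatten with negation stripped, sort with
--     # duplicates, then one linear pass keeping each element only when it
--     # differs from the previously kept one (no membership scans).
--     flat = sorted(e[1:] if e.startswith('-') else e
--                   for clause in lines for e in clause)
--     dictionary = {}
--     prev = None
--     for e in flat:
--         if prev is None or e != prev:
--             dictionary[e] = None
--             prev = e
--     return dictionary
-- ===== Notes on version B (the rewrite author's own statement) =====
-- stated objective: alternative
-- what changed: A dedups each element by scanning an accumulator list for membership and sorts the deduplicated keys afterwards; B flattens all clauses with the negation stripped, sorts the whole multiset once, and dedups in a single pass by comparing each element with its predecessor.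
import Mathlib
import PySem

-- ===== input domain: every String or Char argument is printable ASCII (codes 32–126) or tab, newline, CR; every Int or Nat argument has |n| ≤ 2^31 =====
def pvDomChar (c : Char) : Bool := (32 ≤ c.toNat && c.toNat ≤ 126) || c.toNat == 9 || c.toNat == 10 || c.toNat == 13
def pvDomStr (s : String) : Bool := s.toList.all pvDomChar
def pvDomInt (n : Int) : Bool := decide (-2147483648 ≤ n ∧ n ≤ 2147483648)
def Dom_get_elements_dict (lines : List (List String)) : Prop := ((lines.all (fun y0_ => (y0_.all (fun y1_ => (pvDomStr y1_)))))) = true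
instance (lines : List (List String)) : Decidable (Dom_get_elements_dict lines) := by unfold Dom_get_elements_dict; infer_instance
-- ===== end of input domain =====

-- B replaces A's membership-scan dedup-then-sort by a different strategy — flatten with the
-- negation stripped, sort the whole multiset once, dedup by adjacent comparison — and is proved
-- to return the same dict on every input where A returns (Pre_ excludes empty-string elements,
-- on which A raises IndexError).


-- ===== PORT A =====
def remove_negation (element : String) : String :=
  if PySem.Str.pyGet? element 0 = some '-' then PySem.Str.slice element (some 1) none
  else element

def get_elements_dict (lines : List (List String)) : List (String × Option Int) :=
  let all_elements :=
    lines.foldl (fun acc clause =>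
      clause.foldl (fun acc element =>
        let element := remove_negation element
        if acc.contains element then acc else acc ++ [element]) acc) []
  let all_elements := PySem.List.sorted all_elements (fun x => x)
  let nones : List (Option Int) := (List.range all_elements.length).map (fun _ => none)
  ((all_elements.zip nones).foldl (fun d kv => d.insert kv.1 kv.2)
    (PySem.Dict.empty : PySem.Dict String (Option Int))).items

-- ===== PORT B =====
def stripNeg (e : String) : String :=
  if PySem.Str.startswith e "-" then PySem.Str.slice e (some 1) none else e

def get_elements_dict_alt (lines : List (List String)) : List (String × Option Int) :=
  let flat := PySem.List.sorted (lines.flatMap (fun clause => clause.map stripNeg)) (fun x => x)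
  (flat.foldl (fun (st : PySem.Dict String (Option Int) × Option String) e =>
      match st.2 with
      | none => (st.1.insert e none, some e)
      | some prev => if e ≠ prev then (st.1.insert e none, some e) else st)
    ((PySem.Dict.empty : PySem.Dict String (Option Int)), none)).1.items

-- ===== PRECONDITION & SPEC =====
-- Pre_ excludes exactly the inputs where Python A raises IndexError: a clause containing ''.
def Pre_get_elements_dict (lines : List (List String)) : Prop :=
  ∀ clause ∈ lines, ∀ e ∈ clause, e ≠ ""
instance (lines : List (List String)) : Decidable (Pre_get_elements_dict lines) := by
  unfold Pre_get_elements_dict; infer_instance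

def pvWitness_get_elements_dict : List (List String) := [["-1", "2"], ["1", "-3"]]

def Spec_get_elements_dict (lines : List (List String)) (out : List (String × Option Int)) : Prop :=
  out = get_elements_dict_alt lines
instance (lines : List (List String)) (out : List (String × Option Int)) :
    Decidable (Spec_get_elements_dict lines out) := by unfold Spec_get_elements_dict; infer_instance

-- ===== CLAIM (what is proved, stated in full; the proofs are below) =====
def Claim_equal_get_elements_dict : Prop := ∀ (lines : List (List String)), Dom_get_elements_dict lines → Pre_get_elements_dict lines → Spec_get_elements_dict lines (get_elements_dict lines)

-- ===== LEMMAS AND PROOFS =====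

-- the two negation-strippers agree on every string
theorem rn_eq_stripNeg (e : String) : remove_negation e = stripNeg e := by
  unfold remove_negation stripNeg
  have hiff : (PySem.Str.pyGet? e 0 = some '-') ↔ (PySem.Str.startswith e "-" = true) := by
    simp [pysem]
    cases h : e.toList with
    | nil => simp
    | cons c t => simp; exact eq_comm
  by_cases hb : PySem.Str.startswith e "-" = true
  · rw [if_pos (hiff.mpr hb), if_pos hb]
  · rw [if_neg (fun h => hb (hiff.mp h)), if_neg hb]

-- A's nested dedup loop builds PySem.Set.ofList of the stripped flat list
theorem a_loop_eq_ofList (lines : List (List String)) (acc : List String) :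
    lines.foldl (fun acc clause =>
      clause.foldl (fun acc element =>
        let element := remove_negation element
        if acc.contains element then acc else acc ++ [element]) acc) acc
      = (lines.flatMap (fun clause => clause.map stripNeg)).foldl PySem.Set.add acc := by
  induction lines generalizing acc with
  | nil => simp
  | cons c t ih =>
    have hfun : (fun (acc : List String) element =>
        let element := remove_negation element
        if acc.contains element then acc else acc ++ [element])
        = (fun (acc : List String) e => PySem.Set.add acc (stripNeg e)) := by
      funext acc e; simp [rn_eq_stripNeg, PySem.Set.add]
    simp only [List.foldl_cons, List.flatMap_cons, List.foldl_append, List.foldl_map]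
    rw [ih, hfun]

-- adjacent dedup of B's pass, as a plain function of the sorted list
def adjDedup (prev : Option String) : List String → List String
  | [] => []
  | e :: t =>
    match prev with
    | none => e :: adjDedup (some e) t
    | some p => if e ≠ p then e :: adjDedup (some e) t else adjDedup (some p) t

theorem adjDedup_nil (p : Option String) : adjDedup p [] = [] := rfl
theorem adjDedup_cons_none (e : String) (t : List String) :
    adjDedup none (e :: t) = e :: adjDedup (some e) t := rfl
theorem adjDedup_cons_some (p e : String) (t : List String) :
    adjDedup (some p) (e :: t) = if e ≠ p then e :: adjDedup (some e) t else adjDedup (some p) t := rfl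

theorem adjDedup_mem_some (zs : List String) (p : String)
    (hs : zs.Pairwise (· ≤ ·)) (hp : ∀ y ∈ zs, p ≤ y) (x : String) :
    x ∈ adjDedup (some p) zs ↔ (x ∈ zs ∧ x ≠ p) := by
  induction zs generalizing p with
  | nil => simp [adjDedup]
  | cons e t ih =>
    have hs' := (List.pairwise_cons.mp hs).2
    have he := (List.pairwise_cons.mp hs).1
    by_cases hep : e = p
    · subst hep
      rw [adjDedup_cons_some, if_neg (by simp)]
      rw [ih e hs' he, List.mem_cons]
      constructor
      · rintro ⟨hx, hne⟩; exact ⟨Or.inr hx, hne⟩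
      · rintro ⟨hx, hne⟩
        rcases hx with h | h
        · exact absurd h hne
        · exact ⟨h, hne⟩
    · have hpe : p < e := lt_of_le_of_ne (hp e (by simp)) (fun h => hep h.symm)
      rw [adjDedup_cons_some, if_pos (fun h => hep h)]
      rw [List.mem_cons, ih e hs' he, List.mem_cons]
      constructor
      · rintro (rfl | ⟨hx, hne⟩)
        · exact ⟨Or.inl rfl, ne_of_gt hpe⟩
        · exact ⟨Or.inr hx, ne_of_gt (lt_of_lt_of_le hpe (he x hx))⟩
      · rintro ⟨h | h, hne⟩
        · exact Or.inl h
        · by_cases hxe : x = e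
          · exact Or.inl hxe
          · exact Or.inr ⟨h, hxe⟩

theorem adjDedup_mem_none (zs : List String) (hs : zs.Pairwise (· ≤ ·)) (x : String) :
    x ∈ adjDedup none zs ↔ x ∈ zs := by
  cases zs with
  | nil => simp [adjDedup]
  | cons e t =>
    have hs' := (List.pairwise_cons.mp hs).2
    have he := (List.pairwise_cons.mp hs).1
    rw [adjDedup_cons_none, List.mem_cons, adjDedup_mem_some t e hs' he x, List.mem_cons]
    constructor
    · rintro (rfl | ⟨hx, _⟩)
      · exact Or.inl rfl
      · exact Or.inr hx
    · rintro (rfl | hx)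
      · exact Or.inl rfl
      · by_cases hxe : x = e
        · exact Or.inl hxe
        · exact Or.inr ⟨hx, hxe⟩

theorem adjDedup_lt_some (zs : List String) (p : String)
    (hs : zs.Pairwise (· ≤ ·)) (hp : ∀ y ∈ zs, p ≤ y) :
    (adjDedup (some p) zs).Pairwise (· < ·) ∧ ∀ k ∈ adjDedup (some p) zs, p < k := by
  induction zs generalizing p with
  | nil => simp [adjDedup]
  | cons e t ih =>
    have hs' := (List.pairwise_cons.mp hs).2
    have he := (List.pairwise_cons.mp hs).1
    by_cases hep : e = p
    · subst hep
      rw [adjDedup_cons_some, if_neg (by simp)]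
      exact ih e hs' he
    · have hpe : p < e := lt_of_le_of_ne (hp e (by simp)) (fun h => hep h.symm)
      obtain ⟨h1, h2⟩ := ih e hs' he
      rw [adjDedup_cons_some, if_pos (fun h => hep h)]
      refine ⟨List.pairwise_cons.mpr ⟨h2, h1⟩, ?_⟩
      intro k hk
      rcases List.mem_cons.mp hk with rfl | hk
      · exact hpe
      · exact lt_trans hpe (h2 k hk)

theorem adjDedup_lt_none (zs : List String) (hs : zs.Pairwise (· ≤ ·)) :
    (adjDedup none zs).Pairwise (· < ·) := by
  cases zs with
  | nil => simp [adjDedup]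
  | cons e t =>
    have hs' := (List.pairwise_cons.mp hs).2
    have he := (List.pairwise_cons.mp hs).1
    obtain ⟨h1, h2⟩ := adjDedup_lt_some t e hs' he
    rw [adjDedup_cons_none]
    exact List.pairwise_cons.mpr ⟨h2, h1⟩

-- single fresh insert appends to items
theorem items_insert_fresh (d : PySem.Dict String (Option Int)) (k : String) (v : Option Int)
    (h : d.contains k = false) : (d.insert k v).items = d.items ++ [(k, v)] := by
  have := PySem.Dict.items_foldl_insert_fresh [v] (fun _ => k) (fun x => x) d
    (by simpa using h) (by simp)
  simpa using this

-- B's fold over the sorted list produces exactly the adjacent-dedup keys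
theorem b_fold_items (zs : List String) :
    ∀ (d : PySem.Dict String (Option Int)) (p : Option String),
    zs.Pairwise (· ≤ ·) →
    (∀ pr, p = some pr → ∀ y ∈ zs, pr ≤ y) →
    (∀ k ∈ adjDedup p zs, d.contains k = false) →
    (zs.foldl (fun (st : PySem.Dict String (Option Int) × Option String) e =>
      match st.2 with
      | none => (st.1.insert e none, some e)
      | some prev => if e ≠ prev then (st.1.insert e none, some e) else st) (d, p)).1.items
      = d.items ++ (adjDedup p zs).map (fun e => (e, (none : Option Int))) := by
  induction zs with
  | nil => intro d p _ _ _; simp [adjDedup_nil]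
  | cons e t ih =>
    intro d p hs hp hfresh
    have hs' := (List.pairwise_cons.mp hs).2
    have he := (List.pairwise_cons.mp hs).1
    have tail : ∀ (d' : PySem.Dict String (Option Int)),
        (∀ k ∈ adjDedup (some e) t, d'.contains k = false) →
        (t.foldl (fun (st : PySem.Dict String (Option Int) × Option String) x =>
          match st.2 with
          | none => (st.1.insert x none, some x)
          | some prev => if x ≠ prev then (st.1.insert x none, some x) else st) (d', some e)).1.items
          = d'.items ++ (adjDedup (some e) t).map (fun x => (x, (none : Option Int))) := by
      intro d' hf
      exact ih d' (some e) hs' (by rintro pr ⟨rfl⟩; exact he) hf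
    have hstrict := adjDedup_lt_some t e hs' he
    cases p with
    | none =>
      have hefresh : d.contains e = false := hfresh e (by rw [adjDedup_cons_none]; simp)
      have hrest : ∀ k ∈ adjDedup (some e) t, (d.insert e none).contains k = false := by
        intro k hk
        rw [PySem.Dict.contains_insert]
        have hke : k ≠ e := ne_of_gt (hstrict.2 k hk)
        simp [hke]
        exact hfresh k (by rw [adjDedup_cons_none]; simp [hk])
      simp only [List.foldl_cons]
      rw [tail (d.insert e none) hrest, items_insert_fresh d e none hefresh, adjDedup_cons_none]
      simp
    | some pr =>
      by_cases hepr : e = pr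
      · subst hepr
        simp only [List.foldl_cons]
        have : adjDedup (some e) (e :: t) = adjDedup (some e) t := by
          rw [adjDedup_cons_some, if_neg (fun h => h rfl)]
        rw [this] at hfresh
        rw [if_neg (fun h : e ≠ e => h rfl)]
        rw [ih d (some e) hs' (by rintro x ⟨rfl⟩; exact he) hfresh, this]
      · have hadj : adjDedup (some pr) (e :: t) = e :: adjDedup (some e) t := by
          simp only [adjDedup, if_pos (fun h => hepr h)]
        rw [hadj] at hfresh
        have hefresh : d.contains e = false := hfresh e (by simp)
        have hrest : ∀ k ∈ adjDedup (some e) t, (d.insert e none).contains k = false := by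
          intro k hk
          rw [PySem.Dict.contains_insert]
          have hke : k ≠ e := ne_of_gt (hstrict.2 k hk)
          simp [hke]
          exact hfresh k (by simp [hk])
        simp only [List.foldl_cons, if_pos (fun h => hepr h)]
        rw [tail (d.insert e none) hrest, items_insert_fresh d e none hefresh, hadj]
        simp

theorem zip_nones (l : List String) :
    l.zip (List.replicate l.length (none : Option Int)) = l.map (fun e => (e, none)) := by
  induction l with
  | nil => rfl
  | cons e t ih => simp [List.replicate_succ, ih]

-- ===== VERDICT (by name: the statement is the Claim_ definition above) =====
theorem get_elements_dict_spec : Claim_equal_get_elements_dict := by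
  intro lines _ _
  unfold Spec_get_elements_dict get_elements_dict get_elements_dict_alt
  set ys := lines.flatMap (fun clause => clause.map stripNeg) with hys
  -- A side
  rw [a_loop_eq_ofList]
  have hofl : (ys.foldl PySem.Set.add []) = PySem.Set.ofList ys := rfl
  rw [hofl]
  set allA := PySem.List.sorted (PySem.Set.ofList ys) (fun x => x) with hallA
  set zs := PySem.List.sorted ys (fun x => x) with hzs
  have hzsp : zs.Pairwise (· ≤ ·) := PySem.List.sorted_pairwise ys (fun x => x)
  -- B's items
  have hB := b_fold_items zs PySem.Dict.empty none hzsp (by simp)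
    (by intro k _; rfl)
  rw [hB]
  -- A's items via fresh inserts over the zip
  have hnd : allA.Nodup :=
    ((PySem.List.sorted_perm (PySem.Set.ofList ys) (fun x => x) false).nodup_iff).mpr
      (PySem.Set.nodup_ofList ys)
  have hzipA : allA.zip ((List.range allA.length).map (fun _ => (none : Option Int)))
      = allA.map (fun e => (e, (none : Option Int))) := by
    rw [List.map_const', List.length_range]
    exact zip_nones allA
  have hA := PySem.Dict.items_foldl_insert_fresh
      (allA.zip ((List.range allA.length).map (fun _ => (none : Option Int))))
      Prod.fst Prod.snd PySem.Dict.empty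
    (by intro a _; rfl)
    (by rw [hzipA, List.map_map]; simpa [Function.comp_def] using hnd)
  rw [hA, hzipA]
  -- reduce to equality of the key lists
  have hkeys : allA = adjDedup none zs := by
    apply PySem.List.sorted_eq_of_perm_of_pairwise_lt
    · rw [List.perm_ext_iff_of_nodup]
      · intro a
        rw [adjDedup_mem_none zs hzsp a, hzs, PySem.List.mem_sorted, PySem.Set.mem_ofList]
      · exact (adjDedup_lt_none zs hzsp).imp (fun h => ne_of_lt h)
      · exact PySem.Set.nodup_ofList ys
    · exact adjDedup_lt_none zs hzsp
  rw [hkeys]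
  simp [PySem.Dict.empty]
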